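-- pv_equiv track=rewrite | github.com/m4reQ/sPYke | spyke/utils.py | GetQuadIndexData
-- ===== SOURCE A (Python) =====
-- def GetQuadIndexData(count):
-- 	data = []
--
-- 	offset = 0
-- 	i = 0
-- 	while i < count:
-- 		data.extend([
-- 			0 + offset,
-- 			1 + offset,
-- 			2 + offset,
-- 			2 + offset,
-- 			3 + offset,
-- 			0 + offset])
--
-- 		offset += 4
-- 		i += 6
--
-- 	return data
-- ===== SOURCE B (Python) =====
-- def GetQuadIndexData(count):
-- 	n = (count + 5) // 6 if count > 0 else 0
-- 	pattern = (0, 1, 2, 2, 3, 0)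
-- 	return [pattern[j % 6] + 4 * (j // 6) for j in range(6 * n)]
-- ===== Notes on version B (the rewrite author's own statement) =====
-- stated objective: alternative
-- what changed: Replaces the while-loop that extends 6-element blocks while maintaining separate offset/i counters by a closed-form quad count n=(count+5)//6 and a single comprehension over the flat output index j emitting pattern[j%6]+4*(j//6).
import Mathlib
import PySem

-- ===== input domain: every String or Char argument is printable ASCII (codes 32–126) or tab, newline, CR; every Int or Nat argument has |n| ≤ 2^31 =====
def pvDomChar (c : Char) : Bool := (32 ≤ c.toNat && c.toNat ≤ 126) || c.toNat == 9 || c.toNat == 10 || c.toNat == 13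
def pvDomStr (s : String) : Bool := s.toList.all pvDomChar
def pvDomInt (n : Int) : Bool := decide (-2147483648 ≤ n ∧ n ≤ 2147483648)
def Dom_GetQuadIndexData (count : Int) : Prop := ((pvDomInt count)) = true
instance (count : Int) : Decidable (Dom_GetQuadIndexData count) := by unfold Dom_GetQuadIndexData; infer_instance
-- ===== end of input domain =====

-- B replaces A's while-loop with its offset/i counters by a closed-form quad count and
-- flat-index modular emission pattern[j%6] + 4*(j//6) (alternative decomposition, same cost).

-- ===== PORT A =====
-- the while-loop: data accumulates the extended blocks, offset and i are the loop counters
def pvAloop (count : Int) (data : List Int) (offset i : Int) : List Int :=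
  if i < count then
    pvAloop count
      (data ++ [0 + offset, 1 + offset, 2 + offset, 2 + offset, 3 + offset, 0 + offset])
      (offset + 4) (i + 6)
  else data
termination_by (count - i).toNat
decreasing_by omega

def GetQuadIndexData (count : Int) : List Int := pvAloop count [] 0 0

-- ===== PORT B =====
-- the comprehension's element expression pattern[j % 6] + 4 * (j // 6);
-- j % 6 is always in [0,6) so the tuple indexing never raises and .getD 0 only discharges the Option
def pvQuadEmit (j : Int) : Int :=
  (PySem.List.pyGet? [0, 1, 2, 2, 3, 0] (PySem.Int.mod j 6)).getD 0
    + 4 * PySem.Int.floordiv j 6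

def GetQuadIndexData_alt (count : Int) : List Int :=
  let n : Int := if 0 < count then PySem.Int.floordiv (count + 5) 6 else 0
  (PySem.List.pyRange 0 (6 * n) 1).map pvQuadEmit

-- ===== PRECONDITION & SPEC =====
def Spec_GetQuadIndexData (count : Int) (out : List Int) : Prop := out = GetQuadIndexData_alt count
instance (count : Int) (out : List Int) : Decidable (Spec_GetQuadIndexData count out) := by unfold Spec_GetQuadIndexData; infer_instance

-- ===== CLAIM (what is proved, stated in full; the proofs are below) =====
def Claim_equal_GetQuadIndexData : Prop := ∀ (count : Int), Dom_GetQuadIndexData count → Spec_GetQuadIndexData count (GetQuadIndexData count)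

-- ===== LEMMAS AND PROOFS =====

-- the common shape: n quad blocks starting at a given offset
def pvBlocks : Nat → Int → List Int
  | 0, _ => []
  | n + 1, offset =>
      (0 + offset) :: (1 + offset) :: (2 + offset) :: (2 + offset) :: (3 + offset) :: (0 + offset)
        :: pvBlocks n (offset + 4)

theorem pvAloop_eq_blocks : ∀ (m : Nat) (count : Int) (data : List Int) (offset i : Int),
    ((count - i + 5) / 6).toNat = m →
    pvAloop count data offset i = data ++ pvBlocks m offset := by
  intro m
  induction m with
  | zero =>
    intro count data offset i h
    have hni : ¬ i < count := by omega
    rw [pvAloop]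
    simp [hni, pvBlocks]
  | succ m ih =>
    intro count data offset i h
    have hi : i < count := by omega
    rw [pvAloop]
    simp only [hi, if_pos]
    rw [ih count _ (offset + 4) (i + 6) (by omega)]
    simp [pvBlocks]

theorem pvQuadEmit_eval (k : Int) (r : Nat) (hr : r < 6) :
    pvQuadEmit (6 * k + (r : Int)) =
      (PySem.List.pyGetD [0, 1, 2, 2, 3, 0] (r : Int) 0) + 4 * k := by
  unfold pvQuadEmit
  rw [PySem.Int.mod_eq_emod_of_pos (by norm_num : (0:Int) < 6), PySem.Int.floordiv_eq_ediv_of_pos (by norm_num : (0:Int) < 6)]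
  have h1 : (6 * k + (r : Int)) % 6 = (r : Int) := by omega
  have h2 : (6 * k + (r : Int)) / 6 = k := by omega
  rw [h1, h2]
  rfl

theorem pvB_blocks : ∀ (n : Nat) (k : Int), 0 ≤ k →
    (PySem.List.pyRange (6 * k) (6 * k + 6 * (n : Int)) 1).map pvQuadEmit = pvBlocks n (4 * k) := by
  intro n
  induction n with
  | zero =>
    intro k _
    rw [PySem.List.pyRange_one_eq_nil (by omega)]
    simp [pvBlocks]
  | succ n ih =>
    intro k hk
    push_cast
    rw [PySem.List.pyRange_one_append (6 * k) (6 * k + 6) (6 * k + 6 * ((n : Int) + 1))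
      (by omega) (by omega)]
    have hsplit : PySem.List.pyRange (6 * k) (6 * k + 6) 1 =
        [6 * k, 6 * k + 1, 6 * k + 2, 6 * k + 3, 6 * k + 4, 6 * k + 5] := by
      rw [PySem.List.pyRange_one_cons (by omega), PySem.List.pyRange_one_cons (by omega),
          PySem.List.pyRange_one_cons (by omega), PySem.List.pyRange_one_cons (by omega),
          PySem.List.pyRange_one_cons (by omega), PySem.List.pyRange_one_cons (by omega),
          PySem.List.pyRange_one_eq_nil (by omega)]
      norm_num
      omega
    have htail : PySem.List.pyRange (6 * k + 6) (6 * k + 6 * ((n : Int) + 1)) 1 =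
        PySem.List.pyRange (6 * (k + 1)) (6 * (k + 1) + 6 * (n : Int)) 1 := by
      ring_nf
    rw [hsplit, htail, List.map_append, ih (k + 1) (by omega)]
    have e0 := pvQuadEmit_eval k 0 (by norm_num)
    have e1 := pvQuadEmit_eval k 1 (by norm_num)
    have e2 := pvQuadEmit_eval k 2 (by norm_num)
    have e3 := pvQuadEmit_eval k 3 (by norm_num)
    have e4 := pvQuadEmit_eval k 4 (by norm_num)
    have e5 := pvQuadEmit_eval k 5 (by norm_num)
    norm_num at e0 e1 e2 e3 e4 e5
    simp [pvBlocks, List.map, e0, e1, e2, e3, e4, e5, PySem.List.pyGetD]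
    have h44 : 4 * (k + 1) = 4 * k + 4 := by ring
    rw [h44]

-- ===== VERDICT (by name: the statement is the Claim_ definition above) =====
theorem GetQuadIndexData_spec : Claim_equal_GetQuadIndexData := by
  intro count _
  unfold Spec_GetQuadIndexData GetQuadIndexData GetQuadIndexData_alt
  show pvAloop count [] 0 0 = List.map pvQuadEmit (PySem.List.pyRange 0
    (6 * (if 0 < count then PySem.Int.floordiv (count + 5) 6 else 0)) 1)
  set m : Nat := ((count - 0 + 5) / 6).toNat with hm
  rw [pvAloop_eq_blocks m count [] 0 0 rfl]
  by_cases hc : 0 < count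
  · simp only [hc, if_pos]
    rw [PySem.Int.floordiv_eq_ediv_of_pos (by norm_num : (0:Int) < 6)]
    have hn : (count + 5) / 6 = (m : Int) := by omega
    rw [hn]
    have := pvB_blocks m 0 le_rfl
    simpa using this.symm
  · have hm0 : m = 0 := by omega
    simp [hc, hm0, pvBlocks, PySem.List.pyRange_one_eq_nil (by omega : (0:Int) ≤ 0)]
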